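-- pv_equiv track=rewrite | github.com/tajmilur-rahman/toggle-smells | ts-detector/detectors/toggle_extractor/toggle_extractor.py | clean_and_remove_duplicates
-- ===== SOURCE A (Python) =====
-- def clean_and_remove_duplicates(var_names):
--     """
--     This function takes a list of variable names and performs the following steps:
--
--     1. For each name in the list, if the name starts and ends with a single or double quote
--        (i.e., it's a string in quotes like 'string' or "string"):
--          - It extracts the content inside the quotes.
--          - Cleans the extracted content by removing spaces, dashes, underscores,
--            and converting it to lowercase.
--
--     2. It checks if the cleaned version of this quoted string is part of the cleaned version
--        of any other name in the list. If so, it marks the quoted string for removal.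
--
--     3. After processing all names, it returns a list of variable names with the quoted strings
--        removed if they were part of any other name.
--
--     Parameters:
--     - var_names (list): A list of variable names, which could be normal names or strings in quotes.
--
--     Returns:
--     - list: A new list of variable names, excluding the quoted strings that were part of another name.
--     """
--     def clean_string(s):
--         return s.replace(" ", "").replace("-", "").replace("_", "").lower()
--
--     cleaned_names = []
--     to_remove = set()
--
--     for var in var_names:
--         if var.startswith(("'", '"')) and var.endswith(("'", '"')):
--             quoted_content = var[1:-1]
--             cleaned_quoted = clean_string(quoted_content)
--
--             for other_var in var_names:
--                 if var != other_var:
--                     cleaned_other = clean_string(other_var)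
--                     if cleaned_quoted in cleaned_other:
--                         to_remove.add(var)
--                         break
--         cleaned_names.append(var)
--
--     final_list = [var for var in var_names if var not in to_remove]
--     return final_list
-- ===== SOURCE B (Python) =====
-- def clean_and_remove_duplicates(var_names):
--     def clean(s):
--         return s.replace(" ", "").replace("-", "").replace("_", "").lower()
--
--     def quoted(v):
--         return v.startswith(("'", '"')) and v.endswith(("'", '"'))
--
--     pairs = [(v, clean(v)) for v in var_names]
--
--     def doomed(v):
--         # cleaning deletes every '-', so '-' is a safe separator: one single
--         # substring search in the joined haystack of all other cleaned names
--         others = [c for o, c in pairs if o != v]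
--         return bool(others) and clean(v[1:-1]) in "-".join(others)
--
--     return [v for v in var_names if not (quoted(v) and doomed(v))]
-- ===== Notes on version B (the rewrite author's own statement) =====
-- stated objective: alternative
-- what changed: A's inner per-other-name scan (re-clean each other name, substring-test, break) is replaced by one single substring search per quoted name over a '-'-joined haystack of all other cleaned names, cleaned once up front; correct because cleaning deletes every '-', so the separator cannot be straddled by a match.
import Mathlib
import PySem

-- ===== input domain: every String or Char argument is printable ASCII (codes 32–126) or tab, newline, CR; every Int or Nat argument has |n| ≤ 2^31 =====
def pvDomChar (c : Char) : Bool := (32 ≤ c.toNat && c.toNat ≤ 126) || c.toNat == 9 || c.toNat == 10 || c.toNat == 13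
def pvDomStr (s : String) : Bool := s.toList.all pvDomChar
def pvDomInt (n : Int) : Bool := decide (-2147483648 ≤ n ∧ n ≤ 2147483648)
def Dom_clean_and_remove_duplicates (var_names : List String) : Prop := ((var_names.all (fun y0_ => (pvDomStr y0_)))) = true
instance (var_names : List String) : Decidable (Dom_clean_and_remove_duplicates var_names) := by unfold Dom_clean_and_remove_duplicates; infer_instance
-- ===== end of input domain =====

-- B replaces A's inner per-other-name scan (clean each other name, substring-test, break)
-- by ONE substring search per quoted name over a single '-'-joined haystack of all other
-- cleaned names, cleaned once up front — correct because cleaning deletes every '-',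
-- so '-' is a separator no pattern can straddle.

-- clean_string (defined verbatim in both Pythons)
def pvClean (s : String) : String :=
  PySem.Str.lower (PySem.Str.replace (PySem.Str.replace (PySem.Str.replace s " " "") "-" "") "_" "")

-- ===== PORT A =====
-- inner 'for other_var in var_names: … break' loop of A
def pvInnerA (var cq : String) (to_remove : PySem.Set String) : List String → PySem.Set String
  | [] => to_remove
  | o :: rest =>
    if var != o then
      if PySem.Str.isIn cq (pvClean o) then PySem.Set.add to_remove var
      else pvInnerA var cq to_remove rest
    else pvInnerA var cq to_remove rest

def clean_and_remove_duplicates (var_names : List String) : List String :=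
  let st := var_names.foldl
    (fun (st : List String × PySem.Set String) var =>
      let to_remove :=
        if (PySem.Str.startswith var "'" || PySem.Str.startswith var "\"")
            && (PySem.Str.endswith var "'" || PySem.Str.endswith var "\"") then
          let quoted_content := PySem.Str.slice var (some 1) (some (-1))
          let cleaned_quoted := pvClean quoted_content
          pvInnerA var cleaned_quoted st.2 var_names
        else st.2
      (st.1 ++ [var], to_remove))
    ([], PySem.Set.empty)
  var_names.filter (fun v => !(PySem.Set.contains st.2 v))

-- ===== PORT B =====
def pvQuoted (v : String) : Bool :=
  (PySem.Str.startswith v "'" || PySem.Str.startswith v "\"")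
    && (PySem.Str.endswith v "'" || PySem.Str.endswith v "\"")

-- 'doomed' from Source B: one search in the joined haystack of the other cleaned names
def pvDoomed (pairs : List (String × String)) (v : String) : Bool :=
  let others := (pairs.filter (fun p => p.1 != v)).map (fun p => p.2)
  others != [] &&
    PySem.Str.isIn (pvClean (PySem.Str.slice v (some 1) (some (-1)))) (PySem.Str.join "-" others)

def clean_and_remove_duplicates_alt (var_names : List String) : List String :=
  let pairs := var_names.map (fun v => (v, pvClean v))
  var_names.filter (fun v => !(pvQuoted v && pvDoomed pairs v))

-- ===== PRECONDITION & SPEC =====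
def Spec_clean_and_remove_duplicates (var_names : List String) (out : List String) : Prop := out = clean_and_remove_duplicates_alt var_names
instance (var_names : List String) (out : List String) : Decidable (Spec_clean_and_remove_duplicates var_names out) := by unfold Spec_clean_and_remove_duplicates; infer_instance

-- ===== CLAIM (what is proved, stated in full; the proofs are below) =====
def Claim_equal_clean_and_remove_duplicates : Prop := ∀ (var_names : List String), Dom_clean_and_remove_duplicates var_names → Spec_clean_and_remove_duplicates var_names (clean_and_remove_duplicates var_names)

-- ===== LEMMAS AND PROOFS =====

-- the per-name mark condition A implements
def pvMark (var_names : List String) (v : String) : Prop :=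
  pvQuoted v = true ∧ ∃ o ∈ var_names, v ≠ o ∧
    PySem.Str.isIn (pvClean (PySem.Str.slice v (some 1) (some (-1)))) (pvClean o) = true

theorem mem_pvInnerA (var cq : String) (s : PySem.Set String) (l : List String) (x : String) :
    x ∈ pvInnerA var cq s l ↔
      x ∈ s ∨ (x = var ∧ ∃ o ∈ l, var ≠ o ∧ PySem.Str.isIn cq (pvClean o) = true) := by
  induction l with
  | nil => simp [pvInnerA]
  | cons o rest ih =>
    rw [pvInnerA, List.exists_mem_cons_iff]
    split_ifs with h1 h2
    · rw [bne_iff_ne] at h1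
      rw [PySem.Set.mem_add]
      constructor
      · rintro (hs | rfl)
        · exact Or.inl hs
        · exact Or.inr ⟨rfl, Or.inl ⟨h1, h2⟩⟩
      · rintro (hs | ⟨rfl, _⟩)
        · exact Or.inl hs
        · exact Or.inr rfl
    · rw [ih]
      constructor
      · rintro (hs | ⟨rfl, hex⟩)
        · exact Or.inl hs
        · exact Or.inr ⟨rfl, Or.inr hex⟩
      · rintro (hs | ⟨rfl, (⟨_, hin⟩ | hex)⟩)
        · exact Or.inl hs
        · exact absurd hin h2
        · exact Or.inr ⟨rfl, hex⟩
    · have h1' : var = o := by simpa using h1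
      subst h1'
      rw [ih]
      constructor
      · rintro (hs | ⟨rfl, hex⟩)
        · exact Or.inl hs
        · exact Or.inr ⟨rfl, Or.inr hex⟩
      · rintro (hs | ⟨rfl, (⟨hne, _⟩ | hex)⟩)
        · exact Or.inl hs
        · exact absurd rfl hne
        · exact Or.inr ⟨rfl, hex⟩

theorem mem_foldA (var_names : List String) (l : List String) (acc : List String)
    (s : PySem.Set String) (x : String) :
    x ∈ (l.foldl
      (fun (st : List String × PySem.Set String) var =>
        let to_remove :=
          if (PySem.Str.startswith var "'" || PySem.Str.startswith var "\"")
              && (PySem.Str.endswith var "'" || PySem.Str.endswith var "\"") then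
            let quoted_content := PySem.Str.slice var (some 1) (some (-1))
            let cleaned_quoted := pvClean quoted_content
            pvInnerA var cleaned_quoted st.2 var_names
          else st.2
        (st.1 ++ [var], to_remove)) (acc, s)).2 ↔
      x ∈ s ∨ ∃ v ∈ l, x = v ∧ pvMark var_names v := by
  induction l generalizing acc s with
  | nil => simp
  | cons v rest ih =>
    rw [List.foldl_cons, List.exists_mem_cons_iff]
    simp only []
    split_ifs with hq
    · rw [ih, mem_pvInnerA]
      constructor
      · rintro ((hs | ⟨hxv, hex⟩) | ⟨w, hw, hxw, hm⟩)
        · exact Or.inl hs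
        · exact Or.inr (Or.inl ⟨hxv, ⟨hq, hex⟩⟩)
        · exact Or.inr (Or.inr ⟨w, hw, hxw, hm⟩)
      · rintro (hs | (⟨hxv, hm⟩ | ⟨w, hw, hxw, hm⟩))
        · exact Or.inl (Or.inl hs)
        · exact Or.inl (Or.inr ⟨hxv, hm.2⟩)
        · exact Or.inr ⟨w, hw, hxw, hm⟩
    · rw [ih]
      constructor
      · rintro (hs | ⟨w, hw, hxw, hm⟩)
        · exact Or.inl hs
        · exact Or.inr (Or.inr ⟨w, hw, hxw, hm⟩)
      · rintro (hs | (⟨hxv, hm⟩ | ⟨w, hw, hxw, hm⟩))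
        · exact Or.inl hs
        · exact absurd hm.1 hq
        · exact Or.inr ⟨w, hw, hxw, hm⟩

-- replace with a single-char pattern and empty replacement is a filter
theorem replace_go_single (c : Char) :
    ∀ (fuel : Nat) (l acc : List Char), l.length ≤ fuel →
      PySem.Chars.replace.go [c] [] fuel l acc = acc.reverse ++ l.filter (· != c) := by
  intro fuel
  induction fuel with
  | zero =>
    intro l acc h
    have : l = [] := List.eq_nil_of_length_eq_zero (Nat.le_zero.mp h)
    subst this
    simp [PySem.Chars.replace.go]
  | succ n ih =>
    intro l acc h
    cases l with
    | nil => simp [PySem.Chars.replace.go]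
    | cons a t =>
      rw [PySem.Chars.replace.go]
      by_cases hac : a = c
      · subst hac
        have hpre : List.isPrefixOf [a] (a :: t) = true := by simp [List.isPrefixOf]
        rw [if_pos hpre]
        simp only [List.length_cons, List.length_nil, List.drop_zero, List.drop_succ_cons,
          List.reverse_nil, List.nil_append]
        rw [ih t acc (by simpa using Nat.succ_le_succ_iff.mp h)]
        simp [List.filter_cons]
      · have hpre : List.isPrefixOf [c] (a :: t) = false := by
          simp [List.isPrefixOf]
          exact fun hh => absurd hh.symm hac
        rw [if_neg (by simp [hpre])]
        rw [ih t (a :: acc) (by simpa using Nat.succ_le_succ_iff.mp h)]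
        simp [List.filter_cons, hac]

theorem replace_single (l : List Char) (c : Char) :
    PySem.Chars.replace l [c] [] = l.filter (· != c) := by
  rw [PySem.Chars.replace]
  simp only [List.isEmpty_cons, if_false]
  rw [replace_go_single c l.length l [] (Nat.le_refl _)]
  simp

theorem toList_pvClean (s : String) :
    (pvClean s).toList =
      (((s.toList.filter (· != ' ')).filter (· != '-')).filter (· != '_')).map
        PySem.Chars.lowerChar := by
  unfold pvClean
  rw [PySem.Str.toList_lower, PySem.Str.toList_replace, PySem.Str.toList_replace,
    PySem.Str.toList_replace]
  have h1 : (" " : String).toList = [' '] := by decide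
  have h2 : ("-" : String).toList = ['-'] := by decide
  have h3 : ("_" : String).toList = ['_'] := by decide
  have h4 : ("" : String).toList = [] := by decide
  rw [h1, h2, h3, h4, replace_single, replace_single, replace_single]
  rfl

theorem dash_not_mem_pvClean (s : String) : ('-' : Char) ∉ (pvClean s).toList := by
  rw [toList_pvClean]
  intro hmem
  obtain ⟨a, ha, hla⟩ := List.mem_map.mp hmem
  have hane : (a != '-') = true := by
    have := List.of_mem_filter (List.mem_of_mem_filter ha)
    exact this
  rw [bne_iff_ne] at hane
  unfold PySem.Chars.lowerChar at hla
  split_ifs at hla with hup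
  · unfold PySem.Chars.isupper at hup
    rw [Bool.and_eq_true, decide_eq_true_eq, decide_eq_true_eq] at hup
    have h1 : (65 : Nat) ≤ a.toNat := hup.1
    have h2 : a.toNat ≤ 90 := hup.2
    have hval : (a.toNat + 32).isValidChar := by
      left
      omega
    have := congrArg Char.toNat hla
    rw [Char.toNat_ofNat, if_pos hval] at this
    have : a.toNat + 32 = 45 := this
    omega
  · exact hane hla

-- a pattern not containing d cannot straddle the separator d
theorem isIn_append_cons (q u b : List Char) (d : Char) (hq : q ≠ []) (hd : d ∉ q) :
    PySem.Chars.isIn q (u ++ d :: b) = true ↔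
      PySem.Chars.isIn q u = true ∨ PySem.Chars.isIn q b = true := by
  constructor
  · intro h
    obtain ⟨j, hj⟩ := (PySem.Chars.exists_prefix_drop_iff_isIn q (u ++ d :: b)).mpr h
    rw [List.drop_append] at hj
    by_cases hjl : j ≤ u.length
    · have hz : j - u.length = 0 := Nat.sub_eq_zero_of_le hjl
      rw [hz, List.drop_zero] at hj
      by_cases hlen : q.length ≤ (u.drop j).length
      · left
        rw [← PySem.Chars.exists_prefix_drop_iff_isIn]
        refine ⟨j, ?_⟩
        have hj' : q = List.take q.length (List.drop j u ++ d :: b) :=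
          List.prefix_iff_eq_take.mp hj
        have hq2 : q = (u.drop j).take q.length :=
          hj'.trans (List.take_append_of_le_length hlen)
        rw [hq2]
        exact List.take_prefix _ _
      · exfalso
        apply hd
        push_neg at hlen
        have hi : (u.drop j).length < q.length := hlen
        have := (hj.getElem hi).symm
        rw [List.getElem_append_right (Nat.le_refl _)] at this
        simp only [Nat.sub_self, List.getElem_cons_zero] at this
        rw [this]
        exact List.getElem_mem hi
    · push_neg at hjl
      have hnil : u.drop j = [] := List.drop_eq_nil_of_le (Nat.le_of_lt hjl)
      rw [hnil, List.nil_append] at hj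
      have hk : j - u.length = (j - u.length - 1) + 1 := by omega
      rw [hk, List.drop_succ_cons] at hj
      right
      rw [← PySem.Chars.exists_prefix_drop_iff_isIn]
      exact ⟨j - u.length - 1, hj⟩
  · rintro (h | h)
    · obtain ⟨j, hj⟩ := (PySem.Chars.exists_prefix_drop_iff_isIn q u).mpr h
      by_cases hjl : j ≤ u.length
      · rw [← PySem.Chars.exists_prefix_drop_iff_isIn]
        refine ⟨j, ?_⟩
        rw [List.drop_append, Nat.sub_eq_zero_of_le hjl, List.drop_zero]
        exact hj.trans (List.prefix_append _ _)
      · exfalso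
        push_neg at hjl
        rw [List.drop_eq_nil_of_le (Nat.le_of_lt hjl)] at hj
        exact hq (List.prefix_nil.mp hj)
    · obtain ⟨k, hk⟩ := (PySem.Chars.exists_prefix_drop_iff_isIn q b).mpr h
      rw [← PySem.Chars.exists_prefix_drop_iff_isIn]
      refine ⟨u.length + 1 + k, ?_⟩
      rw [List.drop_append, List.drop_eq_nil_of_le (by omega), List.nil_append]
      have : u.length + 1 + k - u.length = k + 1 := by omega
      rw [this, List.drop_succ_cons]
      exact hk

theorem isIn_join (q : List Char) (hq : q ≠ []) (hd : ('-' : Char) ∉ q) :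
    ∀ (css : List (List Char)),
      PySem.Chars.isIn q (PySem.Chars.join ['-'] css) = true ↔
        ∃ c ∈ css, PySem.Chars.isIn q c = true := by
  intro css
  induction css with
  | nil =>
    rw [PySem.Chars.join_nil]
    simp only [List.not_mem_nil, false_and, exists_false, iff_false, Bool.not_eq_true,
      ← Bool.not_eq_true]
    intro h
    exact hq (List.infix_nil.mp ((PySem.Chars.isIn_iff_infix q []).mp h))
  | cons c rest ih =>
    cases rest with
    | nil =>
      rw [PySem.Chars.join_singleton]
      simp
    | cons c2 r2 =>
      rw [PySem.Chars.join_cons_cons]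
      have : c ++ ['-'] ++ PySem.Chars.join ['-'] (c2 :: r2)
          = c ++ '-' :: PySem.Chars.join ['-'] (c2 :: r2) := by
        simp
      rw [this, isIn_append_cons q c _ '-' hq hd, ih]
      simp [List.exists_mem_cons_iff, or_assoc]

-- B's doomed predicate, characterised
theorem pvDoomed_iff (var_names : List String) (v : String) :
    pvDoomed (var_names.map (fun o => (o, pvClean o))) v = true ↔
      ∃ o ∈ var_names, v ≠ o ∧
        PySem.Str.isIn (pvClean (PySem.Str.slice v (some 1) (some (-1)))) (pvClean o) = true := by
  unfold pvDoomed
  have hfil : (var_names.map (fun o => (o, pvClean o))).filter (fun p => p.1 != v)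
      = ((var_names.filter (fun o => o != v)).map (fun o => (o, pvClean o))) := by
    rw [List.filter_map]
    rfl
  rw [hfil, List.map_map]
  have hothers : ((var_names.filter (fun o => o != v)).map
      ((fun p => p.2) ∘ fun o => (o, pvClean o)))
      = (var_names.filter (fun o => o != v)).map pvClean := rfl
  rw [hothers]
  set q := pvClean (PySem.Str.slice v (some 1) (some (-1))) with hqdef
  set fl := var_names.filter (fun o => o != v) with hfl
  rw [Bool.and_eq_true]
  have hmemfl : ∀ o, o ∈ fl ↔ o ∈ var_names ∧ o ≠ v := by
    intro o
    rw [hfl, List.mem_filter, bne_iff_ne]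
  by_cases hqe : q.toList = []
  · -- empty pattern: found iff there is any other name
    have hAll : ∀ s : String, PySem.Str.isIn q s = true := by
      intro s
      rw [PySem.Str.isIn_eq, PySem.Chars.isIn_iff_infix, hqe]
      exact List.nil_infix
    constructor
    · rintro ⟨hne, _⟩
      rw [bne_iff_ne] at hne
      have : fl ≠ [] := fun h => hne (by rw [h]; rfl)
      obtain ⟨o, ho⟩ := List.exists_mem_of_ne_nil fl this
      obtain ⟨hov, hne'⟩ := (hmemfl o).mp ho
      exact ⟨o, hov, Ne.symm hne', hAll _⟩
    · rintro ⟨o, ho, hne, _⟩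
      have hofl : o ∈ fl := (hmemfl o).mpr ⟨ho, Ne.symm hne⟩
      refine ⟨?_, hAll _⟩
      rw [bne_iff_ne]
      intro hmap
      rw [List.map_eq_nil_iff] at hmap
      rw [hmap] at hofl
      exact List.not_mem_nil hofl
  · -- nonempty pattern: one search over the dash-joined haystack
    have hd : ('-' : Char) ∉ q.toList := dash_not_mem_pvClean _
    rw [PySem.Str.isIn_eq, PySem.Str.toList_join]
    have hsep : ("-" : String).toList = ['-'] := by decide
    rw [hsep, List.map_map, isIn_join q.toList hqe hd]
    constructor
    · rintro ⟨_, c, hc, hin⟩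
      obtain ⟨o, hofl, rfl⟩ := List.mem_map.mp hc
      obtain ⟨hov, hne⟩ := (hmemfl o).mp hofl
      refine ⟨o, hov, Ne.symm hne, ?_⟩
      rw [PySem.Str.isIn_eq]
      exact hin
    · rintro ⟨o, ho, hne, hin⟩
      have hofl : o ∈ fl := (hmemfl o).mpr ⟨ho, Ne.symm hne⟩
      constructor
      · rw [bne_iff_ne]
        intro hmap
        rw [List.map_eq_nil_iff] at hmap
        rw [hmap] at hofl
        exact List.not_mem_nil hofl
      · refine ⟨(pvClean o).toList, List.mem_map.mpr ⟨o, hofl, rfl⟩, ?_⟩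
        rw [PySem.Str.isIn_eq] at hin
        exact hin

-- ===== VERDICT (by name: the statement is the Claim_ definition above) =====
theorem clean_and_remove_duplicates_spec : Claim_equal_clean_and_remove_duplicates := by
  intro var_names _
  unfold Spec_clean_and_remove_duplicates clean_and_remove_duplicates clean_and_remove_duplicates_alt
  apply List.filter_congr
  intro v hv
  congr 1
  rw [Bool.eq_iff_iff]
  rw [PySem.Set.contains_iff, mem_foldA]
  rw [Bool.and_eq_true, pvDoomed_iff]
  constructor
  · rintro (hs | ⟨w, _, rfl, hm⟩)
    · simp at hs
    · exact ⟨hm.1, hm.2⟩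
  · rintro ⟨hq, ho⟩
    exact Or.inr ⟨v, hv, rfl, ⟨hq, ho⟩⟩
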